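-- pv_equiv track=rewrite | github.com/paiml/depyler | examples/hard_final_ml_roc.py | auc_trapezoidal
-- ===== SOURCE A (Python) =====
-- def auc_trapezoidal(roc_pts: list[int]) -> int:
--     """Approximate AUC * 1000000 using trapezoidal rule on ROC points.
--
--     Points should be ordered by increasing FPR.
--     """
--     n: int = len(roc_pts) // 2
--     if n < 2:
--         return 0
--     total: int = 0
--     i: int = 1
--     while i < n:
--         x0: int = roc_pts[(i - 1) * 2]
--         y0: int = roc_pts[(i - 1) * 2 + 1]
--         x1: int = roc_pts[i * 2]
--         y1: int = roc_pts[i * 2 + 1]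
--         width: int = x1 - x0
--         height: int = y0 + y1
--         total = total + width * height
--         i = i + 1
--     return total // 2
-- ===== SOURCE B (Python) =====
-- def auc_trapezoidal(roc_pts: list[int]) -> int:
--     """Approximate AUC * 1000000: per-vertex regrouping of the trapezoidal sum.
--
--     Each point j contributes y_j weighted by the span of its neighbours'
--     x-coordinates (endpoints weighted by their single adjacent edge).
--     """
--     n = len(roc_pts) // 2
--     if n < 2:
--         return 0
--     total = 0
--     for j in range(n):
--         y = roc_pts[2 * j + 1]
--         if j == 0:
--             w = roc_pts[2] - roc_pts[0]
--         elif j == n - 1: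
--             w = roc_pts[2 * j] - roc_pts[2 * (j - 1)]
--         else:
--             w = roc_pts[2 * (j + 1)] - roc_pts[2 * (j - 1)]
--         total += y * w
--     return total // 2
-- ===== Notes on version B (the rewrite author's own statement) =====
-- stated objective: alternative
-- what changed: B iterates over vertices instead of edges: each point j contributes y_j times the span of its neighbours' x-coordinates (endpoints get their single adjacent edge), an exact algebraic regrouping of A's per-edge trapezoid sum.
import Mathlib
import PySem

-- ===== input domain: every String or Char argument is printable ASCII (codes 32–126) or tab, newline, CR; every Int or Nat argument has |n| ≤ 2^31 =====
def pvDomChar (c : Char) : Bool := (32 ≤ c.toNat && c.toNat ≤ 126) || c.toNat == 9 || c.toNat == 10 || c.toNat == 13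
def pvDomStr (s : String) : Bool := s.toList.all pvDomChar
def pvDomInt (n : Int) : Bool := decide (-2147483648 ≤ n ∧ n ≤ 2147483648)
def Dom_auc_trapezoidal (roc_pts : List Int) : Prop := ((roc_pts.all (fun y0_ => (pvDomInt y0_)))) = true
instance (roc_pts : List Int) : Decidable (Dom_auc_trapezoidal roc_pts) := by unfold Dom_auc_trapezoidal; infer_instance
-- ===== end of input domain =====

-- B regroups A's per-edge trapezoidal sum into a per-vertex sum (neighbour-span weights); exact equivalence.

-- ===== PORT A =====
-- edge loop: for i in 1..n-1, total += (x_i - x_{i-1}) * (y_{i-1} + y_i)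
def auc_trapezoidal (roc_pts : List Int) : Int :=
  let n : Int := PySem.Int.floordiv (roc_pts.length : Int) 2
  if n < 2 then 0
  else
    let total : Int := (PySem.List.pyRange 1 n 1).foldl (fun total i =>
      let x0 := PySem.List.pyGetD roc_pts ((i - 1) * 2) 0
      let y0 := PySem.List.pyGetD roc_pts ((i - 1) * 2 + 1) 0
      let x1 := PySem.List.pyGetD roc_pts (i * 2) 0
      let y1 := PySem.List.pyGetD roc_pts (i * 2 + 1) 0
      let width := x1 - x0
      let height := y0 + y1
      total + width * height) 0
    PySem.Int.floordiv total 2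

-- ===== PORT B =====
-- vertex loop: for j in 0..n-1, total += y_j * (span of neighbours' x-coordinates)
def auc_trapezoidal_alt (roc_pts : List Int) : Int :=
  let n : Int := PySem.Int.floordiv (roc_pts.length : Int) 2
  if n < 2 then 0
  else
    let total : Int := (PySem.List.pyRange 0 n 1).foldl (fun total j =>
      let y := PySem.List.pyGetD roc_pts (2 * j + 1) 0
      let w :=
        if j = 0 then
          PySem.List.pyGetD roc_pts 2 0 - PySem.List.pyGetD roc_pts 0 0
        else if j = n - 1 then
          PySem.List.pyGetD roc_pts (2 * j) 0 - PySem.List.pyGetD roc_pts (2 * (j - 1)) 0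
        else
          PySem.List.pyGetD roc_pts (2 * (j + 1)) 0 - PySem.List.pyGetD roc_pts (2 * (j - 1)) 0
      total + y * w) 0
    PySem.Int.floordiv total 2

-- ===== PRECONDITION & SPEC =====
def Spec_auc_trapezoidal (roc_pts : List Int) (out : Int) : Prop := out = auc_trapezoidal_alt roc_pts
instance (roc_pts : List Int) (out : Int) : Decidable (Spec_auc_trapezoidal roc_pts out) := by unfold Spec_auc_trapezoidal; infer_instance

-- ===== CLAIM (what is proved, stated in full; the proofs are below) =====
def Claim_equal_auc_trapezoidal : Prop := ∀ (roc_pts : List Int), Dom_auc_trapezoidal roc_pts → Spec_auc_trapezoidal roc_pts (auc_trapezoidal roc_pts)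

-- ===== LEMMAS AND PROOFS =====

-- per-edge / per-vertex regrouping, abstractly over coordinate functions
theorem pv_key (X Y : Nat → Int) (m : Nat) :
    ((List.range (m + 1)).map (fun k => (X (k + 1) - X k) * (Y k + Y (k + 1)))).sum
    = ((List.range (m + 2)).map (fun j => Y j *
        (if j = 0 then X 1 - X 0
         else if j = m + 1 then X (m + 1) - X m
         else X (j + 1) - X (j - 1)))).sum := by
  induction m with
  | zero => simp [List.range_succ]; ring
  | succ m ih =>
    have hsplit : ∀ (f : Nat → Int) (k : Nat),
        ((List.range (k + 1)).map f).sum = ((List.range k).map f).sum + f k := by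
      intro f k; rw [List.range_succ]; simp
    rw [hsplit _ (m + 1), ih, show m + 1 + 2 = (m + 2) + 1 by omega, hsplit _ (m + 2),
        show m + 2 = (m + 1) + 1 by omega, hsplit _ (m + 1), hsplit _ (m + 1)]
    have hcong : ∀ j ∈ List.range (m + 1),
        Y j * (if j = 0 then X 1 - X 0 else if j = m + 1 + 1 then X (m + 1 + 1) - X (m + 1)
               else X (j + 1) - X (j - 1))
        = Y j * (if j = 0 then X 1 - X 0 else if j = m + 1 then X (m + 1) - X m
               else X (j + 1) - X (j - 1)) := by
      intro j hj
      have hj' : j < m + 1 := List.mem_range.mp hj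
      by_cases h0 : j = 0
      · simp [h0]
      · have h1 : j ≠ m + 1 + 1 := by omega
        have h2 : j ≠ m + 1 := by omega
        simp [h0, h1, h2]
    rw [List.map_congr_left hcong]
    have h1 : m + 1 ≠ 0 := by omega
    have h2 : m + 1 ≠ m + 1 + 1 := by omega
    have h3 : m + 1 + 1 ≠ 0 := by omega
    have e1 : m + 1 + 1 - 1 = m + 1 := by omega
    have e2 : m + 1 - 1 = m := by omega
    simp only [h1, h2, h3, e1, e2, if_false, if_true]
    ring

-- ===== VERDICT (by name: the statement is the Claim_ definition above) =====
theorem auc_trapezoidal_spec : Claim_equal_auc_trapezoidal := by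
  intro roc_pts _
  unfold Spec_auc_trapezoidal auc_trapezoidal auc_trapezoidal_alt
  have hn : PySem.Int.floordiv (roc_pts.length : Int) 2 = ((roc_pts.length / 2 : Nat) : Int) := by
    exact_mod_cast PySem.Int.floordiv_natCast roc_pts.length 2
  rw [hn]
  by_cases h : ((roc_pts.length / 2 : Nat) : Int) < 2
  · simp only [h, if_true]
  · simp only [h, if_false]
    congr 1
    obtain ⟨N, hN2, hNe⟩ : ∃ N : Nat, 2 ≤ N ∧ roc_pts.length / 2 = N := by
      refine ⟨roc_pts.length / 2, ?_, rfl⟩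
      by_contra hc
      exact h (by exact_mod_cast by omega)
    rw [hNe]
    rw [PySem.List.pyRange_one 1 (N : Int), PySem.List.pyRange_one 0 (N : Int)]
    rw [PySem.List.foldl_add, PySem.List.foldl_add]
    have ht1 : (((N : Int)) - 1).toNat = N - 1 := by omega
    have ht0 : (((N : Int)) - 0).toNat = N := by omega
    rw [ht1, ht0]
    have e_edge : (List.range (N - 1)).map ((fun i =>
          (PySem.List.pyGetD roc_pts (i * 2) 0 - PySem.List.pyGetD roc_pts ((i - 1) * 2) 0) *
            (PySem.List.pyGetD roc_pts ((i - 1) * 2 + 1) 0 + PySem.List.pyGetD roc_pts (i * 2 + 1) 0)) ∘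
          (fun k : Nat => (1 : Int) + ↑k))
        = (List.range (N - 1)).map (fun k =>
            (roc_pts.getD (2 * (k + 1)) 0 - roc_pts.getD (2 * k) 0) *
              (roc_pts.getD (2 * k + 1) 0 + roc_pts.getD (2 * (k + 1) + 1) 0)) := by
      apply List.map_congr_left
      intro k _
      have i1 : ((1 : Int) + ↑k) * 2 = ((2 * (k + 1) : Nat) : Int) := by push_cast; ring
      have i2 : ((1 : Int) + ↑k - 1) * 2 = ((2 * k : Nat) : Int) := by push_cast; ring
      have i3 : ((1 : Int) + ↑k - 1) * 2 + 1 = ((2 * k + 1 : Nat) : Int) := by push_cast; ring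
      have i4 : ((1 : Int) + ↑k) * 2 + 1 = ((2 * (k + 1) : Nat) : Int) + 1 := by push_cast; ring
      have i5 : ((2 * k : Nat) : Int) + 1 = ((2 * k + 1 : Nat) : Int) := by push_cast; ring
      have i6 : ((2 * (k + 1) : Nat) : Int) + 1 = ((2 * (k + 1) + 1 : Nat) : Int) := by push_cast; ring
      simp only [Function.comp, i1, i2, i5, i6, PySem.List.pyGetD_natCast]
    have e_vert : (List.range N).map ((fun j =>
          PySem.List.pyGetD roc_pts (2 * j + 1) 0 *
            (if j = 0 then PySem.List.pyGetD roc_pts 2 0 - PySem.List.pyGetD roc_pts 0 0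
             else if j = (N : Int) - 1 then
               PySem.List.pyGetD roc_pts (2 * j) 0 - PySem.List.pyGetD roc_pts (2 * (j - 1)) 0
             else
               PySem.List.pyGetD roc_pts (2 * (j + 1)) 0 - PySem.List.pyGetD roc_pts (2 * (j - 1)) 0)) ∘
          (fun k : Nat => (0 : Int) + ↑k))
        = (List.range N).map (fun j =>
            roc_pts.getD (2 * j + 1) 0 *
              (if j = 0 then roc_pts.getD (2 * 1) 0 - roc_pts.getD (2 * 0) 0
               else if j = N - 1 then roc_pts.getD (2 * (N - 1)) 0 - roc_pts.getD (2 * (N - 2)) 0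
               else roc_pts.getD (2 * (j + 1)) 0 - roc_pts.getD (2 * (j - 1)) 0)) := by
      apply List.map_congr_left
      intro k hk
      have hkN : k < N := List.mem_range.mp hk
      simp only [Function.comp, zero_add]
      have iy : 2 * (k : Int) + 1 = ((2 * k + 1 : Nat) : Int) := by omega
      rw [iy, PySem.List.pyGetD_natCast]
      by_cases h0 : k = 0
      · subst h0
        have c0 : (((0 : Nat) : Int)) = 0 := by norm_num
        rw [if_pos c0, if_pos rfl, show (2 : Int) = ((2 : Nat) : Int) from rfl,
            PySem.List.pyGetD_natCast, PySem.List.pyGetD_zero]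
      · have h0' : ¬((k : Int) = 0) := by omega
        rw [if_neg h0', if_neg h0]
        by_cases h1 : k = N - 1
        · have c : (k : Int) = (N : Int) - 1 := by omega
          rw [if_pos c, if_pos h1]
          have j1 : 2 * (k : Int) = ((2 * (N - 1) : Nat) : Int) := by omega
          have j2 : 2 * ((k : Int) - 1) = ((2 * (N - 2) : Nat) : Int) := by omega
          rw [j1, j2, PySem.List.pyGetD_natCast, PySem.List.pyGetD_natCast]
        · have c : ¬((k : Int) = (N : Int) - 1) := by omega
          rw [if_neg c, if_neg h1]
          have j1 : 2 * ((k : Int) + 1) = ((2 * (k + 1) : Nat) : Int) := by omega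
          have j2 : 2 * ((k : Int) - 1) = ((2 * (k - 1) : Nat) : Int) := by omega
          rw [j1, j2, PySem.List.pyGetD_natCast, PySem.List.pyGetD_natCast]
    rw [List.map_map, List.map_map, e_edge, e_vert]
    have hk := pv_key (fun k => roc_pts.getD (2 * k) 0) (fun k => roc_pts.getD (2 * k + 1) 0) (N - 2)
    rw [show N - 2 + 1 = N - 1 by omega, show N - 2 + 2 = N by omega] at hk
    simpa using hk
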